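-- pv_equiv track=rewrite | github.com/JardineMiller/udacity-ds-algorithms | Lesson 1/Project 1/Task4.py | get_potential_telemarketers_from_calls
-- ===== SOURCE A (Python) =====
-- def get_potential_telemarketers_from_calls(calls):
--     potential_telemarketers = set()
--     confirmed_not_telemarketers = set()
--
--     for record in calls:
--         from_num = record[0]
--         to_num = record[1]
--
--         confirmed_not_telemarketers.add(to_num)
--
--         if (from_num not in confirmed_not_telemarketers):
--             potential_telemarketers.add(from_num)
--
--         potential_telemarketers.discard(to_num)
--
--     return potential_telemarketers
-- ===== SOURCE B (Python) =====
-- def get_potential_telemarketers_from_calls(calls):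
--     froms = {record[0] for record in calls}
--     tos = {record[1] for record in calls}
--     return froms - tos
-- ===== Notes on version B (the rewrite author's own statement) =====
-- stated objective: simpler
-- what changed: Replaces A's single interleaved pass maintaining two mutable sets with a conditional add and a per-record discard by two independent set comprehensions (all from-numbers, all to-numbers) followed by one set difference.
import Mathlib
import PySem

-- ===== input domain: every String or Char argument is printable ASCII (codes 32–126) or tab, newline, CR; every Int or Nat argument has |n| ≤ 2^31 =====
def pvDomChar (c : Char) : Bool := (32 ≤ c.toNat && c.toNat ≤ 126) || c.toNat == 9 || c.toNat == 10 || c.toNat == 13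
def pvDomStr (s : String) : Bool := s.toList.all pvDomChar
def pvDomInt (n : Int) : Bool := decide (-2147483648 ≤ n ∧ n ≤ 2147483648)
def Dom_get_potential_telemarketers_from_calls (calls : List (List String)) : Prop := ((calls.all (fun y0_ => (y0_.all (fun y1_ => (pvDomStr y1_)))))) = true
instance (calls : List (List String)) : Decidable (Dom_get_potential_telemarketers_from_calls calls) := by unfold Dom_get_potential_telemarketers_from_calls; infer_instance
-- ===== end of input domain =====

-- B replaces A's single interleaved pass (conditional add + per-record discard on two running sets)
-- by two independent set comprehensions (from-numbers, to-numbers) and one set difference: simpler.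


-- ===== PORT A =====
-- loop body of A; record[0]/record[1] via pyGetD (Pre_ guarantees length ≥ 2, where Python's
-- record[0]/record[1] return exactly these values and never raise)
def pvStepA (st : PySem.Set String × PySem.Set String) (record : List String) :
    PySem.Set String × PySem.Set String :=
  let from_num := PySem.List.pyGetD record 0 ""
  let to_num := PySem.List.pyGetD record 1 ""
  let confirmed_not_telemarketers := PySem.Set.add st.2 to_num
  let potential_telemarketers :=
    if PySem.Set.contains confirmed_not_telemarketers from_num then st.1
    else PySem.Set.add st.1 from_num
  (PySem.Set.discard potential_telemarketers to_num, confirmed_not_telemarketers)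

def get_potential_telemarketers_from_calls (calls : List (List String)) : List String :=
  (calls.foldl pvStepA (PySem.Set.empty, PySem.Set.empty)).1

-- ===== PORT B =====
def get_potential_telemarketers_from_calls_alt (calls : List (List String)) : List String :=
  let froms := PySem.Set.ofList (calls.map (fun record => PySem.List.pyGetD record 0 ""))
  let tos := PySem.Set.ofList (calls.map (fun record => PySem.List.pyGetD record 1 ""))
  PySem.Set.diff froms tos

-- ===== PRECONDITION & SPEC =====
-- Pre_ excludes only records with fewer than two fields, on which Python's record[0]/record[1]
-- raises IndexError (in A and in B alike).
def Pre_get_potential_telemarketers_from_calls (calls : List (List String)) : Prop :=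
  ∀ r ∈ calls, 2 ≤ r.length
instance (calls : List (List String)) : Decidable (Pre_get_potential_telemarketers_from_calls calls) := by unfold Pre_get_potential_telemarketers_from_calls; infer_instance

def pvWitness_get_potential_telemarketers_from_calls : List (List String) :=
  [["alice", "bob"], ["carol", "alice"], ["dave", "bob"]]

def Spec_get_potential_telemarketers_from_calls (calls : List (List String)) (out : List String) : Prop := out = get_potential_telemarketers_from_calls_alt calls
instance (calls : List (List String)) (out : List String) : Decidable (Spec_get_potential_telemarketers_from_calls calls out) := by unfold Spec_get_potential_telemarketers_from_calls; infer_instance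

-- ===== CLAIM (what is proved, stated in full; the proofs are below) =====
def Claim_equal_get_potential_telemarketers_from_calls : Prop := ∀ (calls : List (List String)), Dom_get_potential_telemarketers_from_calls calls → Pre_get_potential_telemarketers_from_calls calls → Spec_get_potential_telemarketers_from_calls calls (get_potential_telemarketers_from_calls calls)

-- ===== LEMMAS AND PROOFS =====

-- filtering commutes with Set.add
lemma pv_filter_add (p : String → Bool) (s : PySem.Set String) (x : String) :
    (PySem.Set.add s x).filter p
      = if p x then PySem.Set.add (s.filter p) x else s.filter p := by
  rw [PySem.Set.add_eq_ite, PySem.Set.add_eq_ite]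
  by_cases hx : x ∈ s <;> by_cases hp : p x <;>
    simp [hx, hp, List.filter_append, List.mem_filter]

-- filtering commutes with Set.update
lemma pv_filter_update (p : String → Bool) (l : List String) :
    ∀ s : PySem.Set String,
      (PySem.Set.update s l).filter p = PySem.Set.update (s.filter p) (l.filter p) := by
  induction l with
  | nil => intro s; simp [PySem.Set.update]
  | cons x l ih =>
      intro s
      rw [PySem.Set.update_cons, ih]
      by_cases hp : p x
      · simp [hp, PySem.Set.update_cons, pv_filter_add]
      · simp [hp, pv_filter_add]

-- discarding an element the filter drops anyway does not change the filtered set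
lemma pv_filter_discard (p : String → Bool) (s : PySem.Set String) (b : String)
    (hb : p b = false) : (PySem.Set.discard s b).filter p = s.filter p := by
  show (s.filter (fun y => !(y == b))).filter p = s.filter p
  rw [List.filter_filter]
  refine List.filter_congr ?_
  intro x _
  by_cases hx : x = b
  · subst hx; simp [hb]
  · simp [hx]

-- A's fold, from any disjoint state, computes (update pot froms) minus (update conf tos)
lemma pv_foldA_eq (calls : List (List String)) :
    ∀ pot conf : PySem.Set String, (∀ x ∈ pot, x ∉ conf) →
      (calls.foldl pvStepA (pot, conf)).1
        = (PySem.Set.update pot (calls.map (fun r => PySem.List.pyGetD r 0 ""))).filter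
            (fun x => !(PySem.Set.contains
                (PySem.Set.update conf (calls.map (fun r => PySem.List.pyGetD r 1 ""))) x)) := by
  induction calls with
  | nil =>
      intro pot conf hdisj
      simp only [List.foldl_nil, List.map_nil, PySem.Set.update_nil]
      refine (List.filter_eq_self.mpr ?_).symm
      intro x hx
      simp only [PySem.Set.contains_eq_listContains, Bool.not_eq_eq_eq_not, Bool.not_true,
        List.contains_eq_mem, decide_eq_false_iff_not]
      exact hdisj x hx
  | cons r rs ih =>
      intro pot conf hdisj
      set a := PySem.List.pyGetD r 0 "" with ha
      set b := PySem.List.pyGetD r 1 "" with hb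
      have hstep : pvStepA (pot, conf) r =
          (PySem.Set.discard
            (if PySem.Set.contains (PySem.Set.add conf b) a then pot
             else PySem.Set.add pot a) b,
           PySem.Set.add conf b) := rfl
      rw [List.foldl_cons, hstep]
      set conf' := PySem.Set.add conf b with hconf'
      set pot1 := (if PySem.Set.contains conf' a then pot else PySem.Set.add pot a) with hpot1
      have hdisj' : ∀ x ∈ PySem.Set.discard pot1 b, x ∉ conf' := by
        intro x hx hxc
        rw [PySem.Set.mem_discard] at hx
        rw [hconf', PySem.Set.mem_add] at hxc
        rcases hxc with hxc | hxc
        · rw [hpot1] at hx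
          rcases hx with ⟨hx1, hxb⟩
          by_cases hc : PySem.Set.contains conf' a
          · rw [if_pos hc] at hx1; exact hdisj x hx1 hxc
          · rw [if_neg hc, PySem.Set.mem_add] at hx1
            rcases hx1 with hx1 | hx1
            · exact hdisj x hx1 hxc
            · subst hx1
              exact hc ((PySem.Set.contains_iff _ _).mpr ((PySem.Set.mem_add _ _ _).mpr (Or.inl hxc)))
        · exact hx.2 hxc
      rw [ih _ _ hdisj']
      -- both sides now filter by the same predicate
      simp only [List.map_cons, PySem.Set.update_cons]
      rw [← hconf']
      set T := PySem.Set.update conf' (rs.map (fun r => PySem.List.pyGetD r 1 "")) with hT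
      set q : String → Bool := fun x => !(PySem.Set.contains T x) with hq
      have hbT : b ∈ T := by
        rw [hT]; exact (PySem.Set.mem_update _ _ _).mpr (Or.inl ((PySem.Set.mem_add _ _ _).mpr (Or.inr rfl)))
      have hqb : q b = false := by
        rw [hq]; simp; exact hbT
      rw [pv_filter_update, pv_filter_update, pv_filter_discard q pot1 b hqb]
      by_cases hc : PySem.Set.contains conf' a
      · -- a was skipped by A; but a ∈ conf' ⊆ T, so the filter drops it on B's side too
        have haT : a ∈ T := by
          rw [hT]; exact (PySem.Set.mem_update _ _ _).mpr (Or.inl ((PySem.Set.contains_iff _ _).mp hc))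
        have hqa : q a = false := by
          rw [hq]; simp; exact haT
        rw [hpot1, if_pos hc, pv_filter_add, hqa]; simp
      · rw [hpot1, if_neg hc]

-- ===== VERDICT (by name: the statement is the Claim_ definition above) =====
theorem get_potential_telemarketers_from_calls_spec : Claim_equal_get_potential_telemarketers_from_calls := by
  intro calls _ _
  unfold Spec_get_potential_telemarketers_from_calls
  unfold get_potential_telemarketers_from_calls get_potential_telemarketers_from_calls_alt
  rw [pv_foldA_eq calls PySem.Set.empty PySem.Set.empty (by intro x hx; cases hx)]
  rfl
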